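-- pv_equiv track=rewrite | github.com/PiErr0r/comp_prog | everybody_codes/2024_kingdom_of_algorithmia/12.py | flight_path
-- ===== SOURCE A (Python) =====
-- def flight_path(catapult, power):
--     i,j = catapults[catapult]
--     path = [(i,j)]
--     for _ in range(power):
--         i += 1
--         j += 1
--         path.append((i,j))
--     for _ in range(power):
--         j += 1
--         path.append((i,j))
--     while i > 0:
--         i -= 1
--         j += 1
--         path.append((i,j))
--     return path
--
-- catapults = {"A":(0,0),"B":(1,0),"C":(2,0)}
-- ===== SOURCE B (Python) =====
-- catapults = {"A": (0, 0), "B": (1, 0), "C": (2, 0)}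
--
-- def flight_path(catapult, power):
--     # Closed form: point n of the path is (i0 + min(n,p) - max(n-2p,0), j0 + n).
--     i0, j0 = catapults[catapult]
--     p = max(power, 0)
--     return [(i0 + min(n, p) - max(n - 2 * p, 0), j0 + n) for n in range(i0 + 3 * p + 1)]
-- ===== Notes on version B (the rewrite author's own statement) =====
-- stated objective: simpler
-- what changed: Replaces the three stateful phase-loops (ascend, flat, descend over mutable i,j) by a single comprehension evaluating the closed-form arithmetic formula (i0 + min(n,p) - max(n-2p,0), j0 + n) at each index n, with no phases or intermediate state.
import Mathlib
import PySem

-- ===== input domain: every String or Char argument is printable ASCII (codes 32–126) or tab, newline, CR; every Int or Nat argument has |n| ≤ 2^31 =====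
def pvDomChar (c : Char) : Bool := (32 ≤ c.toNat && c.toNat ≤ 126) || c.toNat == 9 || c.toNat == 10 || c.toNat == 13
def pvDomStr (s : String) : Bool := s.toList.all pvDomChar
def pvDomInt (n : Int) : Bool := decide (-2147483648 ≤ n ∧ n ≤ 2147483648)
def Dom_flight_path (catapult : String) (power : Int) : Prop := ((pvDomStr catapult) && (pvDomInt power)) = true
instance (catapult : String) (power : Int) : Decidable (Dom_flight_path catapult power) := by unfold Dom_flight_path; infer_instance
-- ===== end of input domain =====

-- B replaces A's three stateful phase-loops by a single comprehension evaluating the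
-- closed-form formula (i0 + min(n,p) - max(n-2p,0), j0 + n) at each index (objective: simpler).

-- ===== PORT A =====
-- module constant: catapults = {"A":(0,0),"B":(1,0),"C":(2,0)}
def pvCatapults : PySem.Dict String (Int × Int) :=
  PySem.Dict.ofList [("A", (0, 0)), ("B", (1, 0)), ("C", (2, 0))]

-- 'for _ in range(power): i += 1; j += 1; path.append((i,j))'
def fpLoop1 : Nat → Int → Int → List (Int × Int) → Int × Int × List (Int × Int)
  | 0, i, j, path => (i, j, path)
  | n + 1, i, j, path => fpLoop1 n (i + 1) (j + 1) (path ++ [(i + 1, j + 1)])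

-- 'for _ in range(power): j += 1; path.append((i,j))'
def fpLoop2 : Nat → Int → Int → List (Int × Int) → Int × List (Int × Int)
  | 0, _, j, path => (j, path)
  | n + 1, i, j, path => fpLoop2 n i (j + 1) (path ++ [(i, j + 1)])

-- 'while i > 0: i -= 1; j += 1; path.append((i,j))'
def fpLoop3 (i j : Int) (path : List (Int × Int)) : List (Int × Int) :=
  if 0 < i then fpLoop3 (i - 1) (j + 1) (path ++ [(i - 1, j + 1)]) else path
termination_by i.toNat
decreasing_by omega

def flight_path (catapult : String) (power : Int) : List (Int × Int) :=
  match PySem.Dict.get? pvCatapults catapult with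
  | none => []  -- Python raises KeyError here; excluded by Pre_flight_path
  | some (i, j) =>
    let (i, j, path) := fpLoop1 power.toNat i j [(i, j)]
    let (j, path) := fpLoop2 power.toNat i j path
    fpLoop3 i j path

-- ===== PORT B =====
def flight_path_alt (catapult : String) (power : Int) : List (Int × Int) :=
  match PySem.Dict.get? pvCatapults catapult with
  | none => []  -- Python raises KeyError here; excluded by Pre_flight_path
  | some (i0, j0) =>
    let p := max power 0
    (PySem.List.pyRange 0 (i0 + 3 * p + 1) 1).map
      (fun n => (i0 + min n p - max (n - 2 * p) 0, j0 + n))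

-- ===== PRECONDITION & SPEC =====
-- Pre_ excludes exactly the catapult names absent from the module dict, on which Python A raises KeyError.
def Pre_flight_path (catapult : String) (power : Int) : Prop :=
  catapult = "A" ∨ catapult = "B" ∨ catapult = "C"
instance (catapult : String) (power : Int) : Decidable (Pre_flight_path catapult power) := by
  unfold Pre_flight_path; infer_instance

def pvWitness_flight_path : String × Int := ("B", 2)

def Spec_flight_path (catapult : String) (power : Int) (out : List (Int × Int)) : Prop :=
  out = flight_path_alt catapult power
instance (catapult : String) (power : Int) (out : List (Int × Int)) :
    Decidable (Spec_flight_path catapult power out) := by unfold Spec_flight_path; infer_instance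

-- ===== CLAIM (what is proved, stated in full; the proofs are below) =====
def Claim_equal_flight_path : Prop := ∀ (catapult : String) (power : Int),
  Dom_flight_path catapult power → Pre_flight_path catapult power →
  Spec_flight_path catapult power (flight_path catapult power)

-- ===== LEMMAS AND PROOFS =====

theorem fpLoop1_eq (n : Nat) (i j : Int) (path : List (Int × Int)) :
    fpLoop1 n i j path =
      (i + n, j + n,
       path ++ (List.range n).map (fun k : Nat => (i + 1 + (k : Int), j + 1 + (k : Int)))) := by
  induction n generalizing i j path with
  | zero => simp [fpLoop1]
  | succ n ih =>
    rw [fpLoop1, ih]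
    refine Prod.ext (by push_cast; ring) (Prod.ext (by push_cast; ring) ?_)
    rw [List.range_succ_eq_map]
    simp only [List.map_cons, List.map_map, List.append_assoc, List.singleton_append]
    congr 1
    congr 1
    · norm_num
    · refine List.map_congr_left fun k _ => ?_
      simp only [Function.comp_apply]
      exact Prod.ext (by push_cast; ring) (by push_cast; ring)

theorem fpLoop2_eq (n : Nat) (i j : Int) (path : List (Int × Int)) :
    fpLoop2 n i j path =
      (j + n, path ++ (List.range n).map (fun k : Nat => (i, j + 1 + (k : Int)))) := by
  induction n generalizing j path with
  | zero => simp [fpLoop2]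
  | succ n ih =>
    rw [fpLoop2, ih]
    refine Prod.ext (by push_cast; ring) ?_
    rw [List.range_succ_eq_map]
    simp only [List.map_cons, List.map_map, List.append_assoc, List.singleton_append]
    congr 1
    congr 1
    · norm_num
    · refine List.map_congr_left fun k _ => ?_
      simp only [Function.comp_apply]
      exact Prod.ext rfl (by push_cast; ring)

theorem fpLoop3_eq (n : Nat) (i j : Int) (path : List (Int × Int)) (hn : i.toNat = n) :
    fpLoop3 i j path =
      path ++ (List.range n).map (fun k : Nat => (i - 1 - (k : Int), j + 1 + (k : Int))) := by
  induction n generalizing i j path with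
  | zero =>
    rw [fpLoop3]
    have : ¬ 0 < i := by omega
    simp [this]
  | succ n ih =>
    have hi : 0 < i := by omega
    rw [fpLoop3]
    simp only [hi, if_pos]
    rw [ih (i - 1) (j + 1) _ (by omega)]
    rw [List.range_succ_eq_map]
    simp only [List.map_cons, List.map_map, List.append_assoc, List.singleton_append]
    congr 1
    congr 1
    · norm_num
    · refine List.map_congr_left fun k _ => ?_
      simp only [Function.comp_apply]
      exact Prod.ext (by push_cast; ring) (by push_cast; ring)

-- split a map over range (a+(b+c)) into three offset maps
theorem map_range_split {A : Type} (f : Nat → A) (a b c : Nat) :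
    (List.range (a + (b + c))).map f =
      (List.range a).map f ++
        ((List.range b).map (fun k => f (a + k)) ++
          (List.range c).map (fun k => f (a + (b + k)))) := by
  rw [List.range_add, List.map_append, List.map_map, List.range_add, List.map_append,
      List.map_map]
  rfl

-- the two post-lookup bodies agree for any table entry with 0 ≤ i0
theorem bodies_agree (i0 j0 power : Int) (h0 : 0 ≤ i0) :
    (let (i, j, path) := fpLoop1 power.toNat i0 j0 [(i0, j0)]
     let (j, path) := fpLoop2 power.toNat i j path
     fpLoop3 i j path) =
    (let p := max power 0
     (PySem.List.pyRange 0 (i0 + 3 * p + 1) 1).map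
       (fun n => (i0 + min n p - max (n - 2 * p) 0, j0 + n))) := by
  set m : Nat := power.toNat with hm
  have hmax : max power 0 = ((m : Nat) : Int) := by omega
  set t : Nat := (i0 + (m : Int)).toNat with ht
  rw [fpLoop1_eq]
  dsimp only
  rw [fpLoop2_eq]
  rw [fpLoop3_eq t _ _ _ (by omega)]
  dsimp only
  rw [hmax, PySem.List.pyRange_one]
  have hT : (i0 + 3 * ((m : Nat) : Int) + 1 - 0).toNat = (m + 1) + (m + t) := by omega
  rw [hT, map_range_split, List.range_succ_eq_map]
  simp only [List.map_append, List.map_cons, List.map_map, List.append_assoc,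
             List.cons_append, List.nil_append, Function.comp_def]
  congr 1
  · -- the start point
    refine Prod.ext ?_ ?_ <;> push_cast <;> omega
  congr 1
  · -- ascending phase
    refine List.map_congr_left fun k hk => ?_
    have hk' : k < m := List.mem_range.mp hk
    refine Prod.ext ?_ ?_ <;> push_cast <;> omega
  congr 1
  · -- flat phase
    refine List.map_congr_left fun k hk => ?_
    have hk' : k < m := List.mem_range.mp hk
    refine Prod.ext ?_ ?_ <;> push_cast <;> omega
  · -- descending phase
    refine List.map_congr_left fun k hk => ?_
    have hk' : k < t := List.mem_range.mp hk
    refine Prod.ext ?_ ?_ <;> push_cast <;> omega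

-- ===== VERDICT (by name: the statement is the Claim_ definition above) =====
theorem flight_path_spec : Claim_equal_flight_path := by
  intro catapult power _ hpre
  unfold Spec_flight_path flight_path flight_path_alt
  rcases hpre with h | h | h <;> subst h <;>
    simp only [show PySem.Dict.get? pvCatapults "A" = some ((0 : Int), (0 : Int)) from rfl,
               show PySem.Dict.get? pvCatapults "B" = some ((1 : Int), (0 : Int)) from rfl,
               show PySem.Dict.get? pvCatapults "C" = some ((2 : Int), (0 : Int)) from rfl]
  · exact bodies_agree 0 0 power (by norm_num)
  · exact bodies_agree 1 0 power (by norm_num)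
  · exact bodies_agree 2 0 power (by norm_num)
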